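-- pv_equiv track=rewrite | github.com/typeRYOON/Scripts | Pather/menu.py | remainsSplit
-- ===== SOURCE A (Python) =====
-- def remainsSplit(R: list) -> bool:
--     inComma, start, end = False, 0, -1
--     remains = R[0]; R.clear()
--
--     if '"' not in remains: R.append(remains)
--     for i, chr in enumerate(remains):
--         if chr != '"': continue
--         if not inComma:
--             inComma, start = True, i
--         else:
--             inComma, end = False, i
--             R.append(remains[start+1:end])
--     if inComma: return False
--     return True
-- ===== SOURCE B (Python) =====
-- def remainsSplit(R: list) -> bool:
--     remains = R[0]
--     R.clear()
--     if '"' not in remains: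
--         R.append(remains)
--         return True
--     parts = remains.split('"')
--     R.extend(parts[1:-1:2])
--     return len(parts) % 2 == 1
-- ===== Notes on version B (the rewrite author's own statement) =====
-- stated objective: simpler
-- what changed: Replaces the character-by-character inComma state machine with a single str.split on the quote character: the quoted substrings are parts[1:-1:2] and balance is len(parts) % 2 == 1.
-- outside the precondition, e.g. on remainsSplit([]): A raises IndexError, B raises IndexError
import Mathlib
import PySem

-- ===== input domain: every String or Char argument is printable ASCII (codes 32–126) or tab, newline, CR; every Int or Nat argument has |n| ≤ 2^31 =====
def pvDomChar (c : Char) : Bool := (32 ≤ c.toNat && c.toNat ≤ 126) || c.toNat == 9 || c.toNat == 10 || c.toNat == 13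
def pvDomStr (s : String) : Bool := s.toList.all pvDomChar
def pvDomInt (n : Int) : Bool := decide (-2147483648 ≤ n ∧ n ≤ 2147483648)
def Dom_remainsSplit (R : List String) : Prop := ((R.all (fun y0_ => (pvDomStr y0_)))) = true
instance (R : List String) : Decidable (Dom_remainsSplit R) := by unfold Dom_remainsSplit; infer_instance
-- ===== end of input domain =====

-- B replaces A's character-by-character inComma state machine with one str.split on '"'
-- (quoted substrings = parts[1:-1:2], balance = odd number of parts); simpler, same cost.
-- Both Pythons mutate R in place identically; the equivalence proved here is about the
-- RETURN value only (the ports return the Bool).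

-- ===== PORT A =====
-- A's loop step: 'if chr != '"': continue; if not inComma: inComma, start = True, i
-- else: inComma, end = False, i; R.append(...)' — state (inComma, start, end).
def remainsSplitStep (acc : Bool × Int × Int) (ic : Int × Char) : Bool × Int × Int :=
  if ic.2 != '"' then acc
  else if !acc.1 then (true, ic.1, acc.2.2)
  else (false, acc.2.1, ic.1)

def remainsSplit (R : List String) : Bool :=
  match R with
  | [] => false  -- Python raises IndexError on R[0]; excluded by Pre_
  | remains :: _ =>
    let st := (PySem.List.enumerate remains.toList 0).foldl remainsSplitStep (false, 0, -1)
    if st.1 then false else true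

-- ===== PORT B =====
def remainsSplit_alt (R : List String) : Bool :=
  match R with
  | [] => false  -- Python raises IndexError on R[0]; excluded by Pre_
  | remains :: _ =>
    if PySem.Str.isIn "\"" remains = false then true
    else
      let parts := PySem.Chars.splitOn remains.toList ['"']
      decide (parts.length % 2 = 1)

-- ===== PRECONDITION & SPEC =====
-- Pre_ excludes only the empty list, on which Python A (and B) raise IndexError at R[0].
def Pre_remainsSplit (R : List String) : Prop := R ≠ []
instance (R : List String) : Decidable (Pre_remainsSplit R) := by unfold Pre_remainsSplit; infer_instance
def pvWitness_remainsSplit : List String := ["a\"b\"c"]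

def Spec_remainsSplit (R : List String) (out : Bool) : Prop := out = remainsSplit_alt R
instance (R : List String) (out : Bool) : Decidable (Spec_remainsSplit R out) := by unfold Spec_remainsSplit; infer_instance

-- ===== CLAIM (what is proved, stated in full; the proofs are below) =====
def Claim_equal_remainsSplit : Prop := ∀ (R : List String), Dom_remainsSplit R → Pre_remainsSplit R → Spec_remainsSplit R (remainsSplit R)

-- ===== LEMMAS AND PROOFS =====

-- A's fold flips inComma once per quote: its first component is b xor (parity of quote count).
theorem fold_fst (cs : List Char) : ∀ (i s e : Int) (b : Bool),
    ((PySem.List.enumerate cs i).foldl remainsSplitStep (b, s, e)).1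
      = (b != decide (cs.count '"' % 2 = 1)) := by
  induction cs with
  | nil => intro i s e b; simp [PySem.List.enumerate_nil]
  | cons c cs ih =>
    intro i s e b
    rw [PySem.List.enumerate_cons]
    by_cases hc : c = '"'
    · subst hc
      cases b
      · simp only [List.foldl_cons, remainsSplitStep]
        norm_num
        rw [ih]
        simp [Nat.add_mod]
        rcases Nat.mod_two_eq_zero_or_one (cs.count '"') with h | h <;> simp [h]
      · simp only [List.foldl_cons, remainsSplitStep]
        norm_num
        rw [ih]
        simp [Nat.add_mod]
        rcases Nat.mod_two_eq_zero_or_one (cs.count '"') with h | h <;> simp [h]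
    · simp only [List.foldl_cons, remainsSplitStep]
      have hbne : (c != '"') = true := by simpa using hc
      rw [hbne]
      rw [ih]
      simp [hc]

-- splitOn with a single-character separator produces (count of that char) + 1 parts.
theorem splitOn_go_length (q : Char) : ∀ (fuel : Nat) (l cur : List Char) (acc : List (List Char)),
    l.length ≤ fuel →
    (PySem.Chars.splitOn.go [q] fuel l cur acc).length = acc.length + 1 + l.count q := by
  intro fuel
  induction fuel with
  | zero =>
    intro l cur acc h
    have : l = [] := List.eq_nil_of_length_eq_zero (Nat.le_zero.mp h)
    subst this
    simp [PySem.Chars.splitOn.go]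
  | succ n ih =>
    intro l cur acc h
    cases l with
    | nil => simp [PySem.Chars.splitOn.go]
    | cons c rest =>
      simp only [PySem.Chars.splitOn.go]
      by_cases hq : c = q
      · subst hq
        simp only [List.isPrefixOf, beq_self_eq_true, Bool.true_and, if_pos]
        rw [ih _ _ _ (by simpa using Nat.le_of_succ_le_succ h)]
        simp
        omega
      · have : ([q].isPrefixOf (c :: rest)) = false := by
          simp [List.isPrefixOf]; exact fun h' => absurd h'.symm hq
        rw [this]
        simp only [Bool.false_eq_true, if_neg, not_false_iff]
        rw [ih _ _ _ (Nat.le_of_succ_le_succ h)]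
        simp [hq]
theorem splitOn_singleton_length (cs : List Char) (q : Char) :
    (PySem.Chars.splitOn cs [q]).length = cs.count q + 1 := by
  unfold PySem.Chars.splitOn
  rw [splitOn_go_length q _ _ _ _ (Nat.le_succ _)]
  simp [Nat.add_comm]

-- '"' occurs in cs iff the singleton string is an infix.
theorem singleton_infix_iff (q : Char) (cs : List Char) : [q] <:+: cs ↔ q ∈ cs := by
  constructor
  · intro h
    exact (List.singleton_sublist).mp h.sublist
  · intro h
    rcases List.append_of_mem h with ⟨a, b, rfl⟩
    exact ⟨a, b, by simp⟩

-- ===== VERDICT (by name: the statement is the Claim_ definition above) =====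
theorem remainsSplit_spec : Claim_equal_remainsSplit := by
  intro R _ hpre
  unfold Spec_remainsSplit
  match R with
  | [] => exact absurd rfl hpre
  | remains :: rest =>
    simp only [remainsSplit, remainsSplit_alt]
    rw [fold_fst]
    by_cases hin : PySem.Str.isIn "\"" remains = false
    · have : '"' ∉ remains.toList := by
        have := (PySem.Chars.isIn_eq_false_iff (sub := "\"".toList) (s := remains.toList)).mp
          (by simpa [PySem.Str.isIn] using hin)
        intro hmem
        exact this ((singleton_infix_iff '"' remains.toList).mpr (by simpa using hmem))
      rw [if_pos hin]
      simp [List.count_eq_zero_of_not_mem this]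
    · rw [if_neg hin]
      rw [show PySem.Chars.splitOn remains.toList ['"']
            = PySem.Chars.splitOn remains.toList [ '"' ] from rfl]
      rw [splitOn_singleton_length]
      rcases Nat.even_or_odd (remains.toList.count '"') with he | ho
      · have h2 : remains.toList.count '"' % 2 = 0 := Nat.even_iff.mp he
        simp [h2, Nat.add_mod]
      · have h2 : remains.toList.count '"' % 2 = 1 := Nat.odd_iff.mp ho
        simp [h2, Nat.add_mod]
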